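-- pv_equiv track=rewrite | github.com/kkkkkk0312/CodingTest_Python | 프로그래머스/0/120853. 컨트롤 제트/컨트롤 제트.py | solution
-- ===== SOURCE A (Python) =====
-- def solution(s):
--     answer = 0
--     index=[]
--     a=s.split()
--     for i,j in enumerate(a):
--         if j=='Z':
--             index.append(i-1)
--             index.append(i)
--
--     set_index=set(index)
--     return sum(int(a[i]) for i in range(len(a)) if i not in set_index)
-- ===== SOURCE B (Python) =====
-- def solution(s):
--     a = s.split()
--     total = 0
--     for t, nxt in zip(a, a[1:] + ['']):
--         if t != 'Z' and nxt != 'Z':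
--             total += int(t)
--     return total
-- ===== Notes on version B (the rewrite author's own statement) =====
-- stated objective: simpler
-- what changed: B drops A's auxiliary index list / exclusion set and second pass over range(len(a)), summing in one loop with a neighbour look-ahead: a token is counted iff it is not 'Z' and the next token (padded '') is not 'Z'.
import Mathlib
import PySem

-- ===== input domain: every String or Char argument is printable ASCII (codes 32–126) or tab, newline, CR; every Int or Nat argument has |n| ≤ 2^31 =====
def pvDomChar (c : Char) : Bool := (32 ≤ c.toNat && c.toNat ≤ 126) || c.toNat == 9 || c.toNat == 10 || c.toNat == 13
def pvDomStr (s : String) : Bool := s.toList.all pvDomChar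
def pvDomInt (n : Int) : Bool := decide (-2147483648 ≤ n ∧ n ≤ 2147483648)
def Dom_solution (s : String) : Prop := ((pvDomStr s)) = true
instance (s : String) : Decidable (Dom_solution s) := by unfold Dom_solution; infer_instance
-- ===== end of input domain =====

-- B drops A's index list / exclusion set and second pass, summing in one loop with a neighbour look-ahead (objective: simpler).

-- ===== PORT A =====
def solution (s : String) : Int :=
  let a := PySem.Str.split₀ s
  let index : List Int := (PySem.List.enumerate a).foldl
      (fun idx ij => if ij.2 = "Z" then idx ++ [ij.1 - 1, ij.1] else idx) []
  let setIndex : PySem.Set Int := PySem.Set.ofList index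
  -- int(a[i]) raises ValueError on non-integer tokens: excluded by Pre_solution
  (PySem.List.pyRange 0 a.length 1).foldl
    (fun acc i => if ¬ (PySem.Set.contains setIndex i = true) then
        acc + (PySem.Int.ofStr? (PySem.List.pyGetD a i "")).getD 0 else acc) 0

-- ===== PORT B =====
def solution_alt (s : String) : Int :=
  let a := PySem.Str.split₀ s
  (a.zip (a.drop 1 ++ [""])).foldl
    (fun acc tn => if tn.1 ≠ "Z" ∧ tn.2 ≠ "Z" then
        acc + (PySem.Int.ofStr? tn.1).getD 0 else acc) 0

-- ===== PRECONDITION & SPEC =====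
-- Pre_ excludes exactly the inputs where Python A raises ValueError: a counted token
-- (not 'Z' and not immediately followed by 'Z') that int() cannot parse.
def Pre_solution (s : String) : Prop :=
  let a := PySem.Str.split₀ s
  ∀ k ∈ List.range a.length,
    (a.getD k "" ≠ "Z" ∧ a.getD (k+1) "" ≠ "Z") →
      (PySem.Int.ofStr? (a.getD k "")).isSome = true
instance (s : String) : Decidable (Pre_solution s) := by unfold Pre_solution; infer_instance

def pvWitness_solution : String := "1 2 Z 3"

def Spec_solution (s : String) (out : Int) : Prop := out = solution_alt s
instance (s : String) (out : Int) : Decidable (Spec_solution s out) := by unfold Spec_solution; infer_instance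

-- ===== CLAIM (what is proved, stated in full; the proofs are below) =====
def Claim_equal_solution : Prop := ∀ (s : String), Dom_solution s → Pre_solution s → Spec_solution s (solution s)

-- ===== LEMMAS AND PROOFS =====

-- an 'if p then acc + g else acc' fold is the sum of a map
theorem foldl_if_add {α : Type} (l : List α) (p : α → Prop) [DecidablePred p]
    (g : α → Int) (acc : Int) :
    l.foldl (fun acc x => if p x then acc + g x else acc) acc
      = acc + (l.map (fun x => if p x then g x else 0)).sum := by
  induction l generalizing acc with
  | nil => simp
  | cons x xs ih =>
    simp only [List.foldl_cons, List.map_cons, List.sum_cons, ih]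
    split_ifs <;> ring

-- membership in the accumulated index list (fold over enumerated pairs)
theorem mem_index_fold (l : List (Int × String)) (acc : List Int) (m : Int) :
    m ∈ l.foldl (fun idx ij => if ij.2 = "Z" then idx ++ [ij.1 - 1, ij.1] else idx) acc
      ↔ m ∈ acc ∨ ∃ p ∈ l, p.2 = "Z" ∧ (m = p.1 - 1 ∨ m = p.1) := by
  induction l generalizing acc with
  | nil => simp
  | cons x xs ih =>
    simp only [List.foldl_cons, ih]
    by_cases hx : x.2 = "Z" <;> simp [hx, or_assoc]

-- the zipped look-ahead list, elementwise
theorem zip_lookahead (a : List String) :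
    a.zip (a.drop 1 ++ [""])
      = (List.range a.length).map (fun k => (a.getD k "", a.getD (k+1) "")) := by
  apply List.ext_getElem
  · simp only [List.length_zip, List.length_append, List.length_drop,
      List.length_singleton, List.length_map, List.length_range]
    omega
  · intro k h1 h2
    simp only [List.length_zip, List.length_append, List.length_drop,
      List.length_singleton] at h1
    have hk : k < a.length := by omega
    simp only [List.getElem_zip, List.getElem_map, List.getElem_range]
    have hfst : a.getD k "" = a[k] := by
      simp [List.getD_eq_getElem?_getD, List.getElem?_eq_getElem hk]
    have hsnd : (List.drop 1 a ++ [""])[k]'(by simp; omega) = a.getD (k+1) "" := by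
      by_cases hk1 : k + 1 < a.length
      · have hlt : k < (a.drop 1).length := by simp; omega
        rw [List.getElem_append_left hlt]
        simp [List.getD_eq_getElem?_getD, List.getElem?_eq_getElem hk1]
      · have hlen : (a.drop 1).length = a.length - 1 := by simp
        have hge : (a.drop 1).length ≤ k := by omega
        rw [List.getElem_append_right hge]
        simp [List.getD_eq_getElem?_getD, List.getElem?_eq_none (by omega : a.length ≤ k + 1)]
    rw [hfst] at *
    rw [hsnd]

-- a position is outside A's exclusion set iff it is not 'Z' and not followed by 'Z'
theorem not_mem_index_iff (a : List String) (k : Nat) (hk : k < a.length) :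
    (¬ ((k : Int) ∈ (PySem.List.enumerate a).foldl
        (fun idx ij => if ij.2 = "Z" then idx ++ [ij.1 - 1, ij.1] else idx) []))
      ↔ (a.getD k "" ≠ "Z" ∧ a.getD (k+1) "" ≠ "Z") := by
  have hgk : a.getD k "" = a[k] := by
    simp [List.getD_eq_getElem?_getD, List.getElem?_eq_getElem hk]
  rw [mem_index_fold]
  simp only [List.not_mem_nil, false_or, not_exists, not_and, not_or]
  constructor
  · intro h
    refine ⟨?_, ?_⟩
    · intro hz
      have hm : ((0 : Int) + (k : Nat), a[k]) ∈ PySem.List.enumerate a := by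
        rw [PySem.List.mem_enumerate_iff]; exact ⟨k, hk, rfl⟩
      exact (h _ hm (hgk ▸ hz)).2 (by ring)
    · intro hz
      by_cases hk1 : k + 1 < a.length
      · have hg1 : a.getD (k+1) "" = a[k+1] := by
          simp [List.getD_eq_getElem?_getD, List.getElem?_eq_getElem hk1]
        have hm : ((0 : Int) + ((k+1 : Nat) : Int), a[k+1]) ∈ PySem.List.enumerate a := by
          rw [PySem.List.mem_enumerate_iff]; exact ⟨k+1, hk1, rfl⟩
        exact (h _ hm (hg1 ▸ hz)).1 (by push_cast; ring)
      · have : a.getD (k+1) "" = "" := by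
          simp [List.getD_eq_getElem?_getD, List.getElem?_eq_none (by omega : a.length ≤ k + 1)]
        rw [this] at hz
        exact absurd hz (by decide)
  · rintro ⟨h1, h2⟩ p hp hz
    rw [PySem.List.mem_enumerate_iff] at hp
    obtain ⟨j, hj, rfl⟩ := hp
    simp only [] at hz ⊢
    have hja : a[j] = "Z" := by simpa [List.getElem?_eq_getElem hj] using hz
    constructor
    · intro he
      have hjk : j = k + 1 := by omega
      subst hjk
      have hg1 : a.getD (k+1) "" = a[k+1] := by
        simp [List.getD_eq_getElem?_getD, List.getElem?_eq_getElem hj]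
      exact h2 (by rw [hg1, hja])
    · intro he
      have hjk : j = k := by omega
      subst hjk
      exact h1 (by rw [hgk, hja])

-- ===== VERDICT (by name: the statement is the Claim_ definition above) =====
theorem solution_spec : Claim_equal_solution := by
  intro s _ _
  unfold Spec_solution solution solution_alt
  simp only []
  set a := PySem.Str.split₀ s with ha
  rw [foldl_if_add, foldl_if_add, zip_lookahead, List.map_map,
      PySem.List.pyRange_one, List.map_map]
  have hn : (((a.length : Int) - 0)).toNat = a.length := by simp
  rw [hn]
  congr 1
  refine congrArg List.sum (List.map_congr_left ?_)
  intro k hκ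
  have hk : k < a.length := List.mem_range.mp hκ
  simp only [Function.comp]
  have hz : (0 : Int) + (k : Int) = (k : Int) := by ring
  rw [hz]
  have hget : PySem.List.pyGetD a ((k : Nat) : Int) "" = a.getD k "" := by
    simp [PySem.List.pyGetD_natCast]
  have hmem := not_mem_index_iff a k hk
  rw [← PySem.Set.mem_ofList, ← PySem.Set.contains_iff] at hmem
  rw [hget]
  exact if_congr hmem rfl rfl
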